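-- pv_equiv track=rewrite | github.com/yeseong31/coding-test | Programmers/Level1&2/야간_전술보행.py | solution
-- ===== SOURCE A (Python) =====
-- def solution(distance, scope, times):
--     for i, s in enumerate(scope):
--         s.sort()
--         for p in range(s[0], s[1] + 1):
--             if 1 <= p % sum(times[i]) <= times[i][0]:
--                 distance = min(distance, p)
--                 break
--
--     return distance
-- ===== SOURCE B (Python) =====
-- def solution(distance, scope, times):
--     # Same in-place sort of each scope sublist as the original.
--     for i, s in enumerate(scope):
--         s.sort()
--         lo, hi = s[0], s[1]
--         t = sum(times[i])
--         a = times[i][0]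
--         r = lo % t
--         # first p >= lo with p % t in [1, a]: lo itself, else the next point of residue 1
--         p = lo if 1 <= r <= a else lo + (1 - r) % t
--         if 1 <= p % t <= a and p <= hi:
--             distance = min(distance, p)
--     return distance
-- ===== Notes on version B (the rewrite author's own statement) =====
-- stated objective: faster
-- what changed: Replaces the inner linear scan over range(s[0], s[1]+1) with an O(1) modular-arithmetic computation of the first p in the interval whose residue mod sum(times[i]) lies in [1, times[i][0]].
import Mathlib
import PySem

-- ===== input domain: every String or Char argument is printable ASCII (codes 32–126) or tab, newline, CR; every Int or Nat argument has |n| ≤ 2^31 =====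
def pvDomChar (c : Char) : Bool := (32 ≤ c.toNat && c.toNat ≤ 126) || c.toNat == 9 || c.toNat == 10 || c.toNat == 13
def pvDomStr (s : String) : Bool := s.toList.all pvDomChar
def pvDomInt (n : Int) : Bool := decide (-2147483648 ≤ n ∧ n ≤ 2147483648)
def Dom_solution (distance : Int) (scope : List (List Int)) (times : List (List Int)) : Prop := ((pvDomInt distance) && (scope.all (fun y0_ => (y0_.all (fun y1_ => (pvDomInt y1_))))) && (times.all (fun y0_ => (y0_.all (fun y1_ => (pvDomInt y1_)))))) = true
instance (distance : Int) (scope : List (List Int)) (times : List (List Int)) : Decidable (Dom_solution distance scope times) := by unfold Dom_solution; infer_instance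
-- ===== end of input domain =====

-- B replaces A's linear scan of each [s0,s1] interval by an O(1) modular-arithmetic jump to the
-- first admissible p (objective: faster). Both versions sort each scope sublist in place; the
-- equivalence proved here is about the return value (B performs the same mutation).

-- ===== PORT A =====
-- sum(xs) for a list of ints (used by both ports)
def pvSum (l : List Int) : Int := l.foldl (· + ·) 0

-- A's inner 'for p in range(..): if ..: break' — a scan with early exit; the fuel is the
-- length of the range, so this is exactly the Python loop
def pvScan (t a p : Int) : Nat → Option Int
  | 0 => none
  | n + 1 =>
    if 1 ≤ PySem.Int.mod p t ∧ PySem.Int.mod p t ≤ a then some p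
    else pvScan t a (p + 1) n

def solution (distance : Int) (scope : List (List Int)) (times : List (List Int)) : Int :=
  (PySem.List.enumerate scope).foldl (fun d pr =>
    let s := PySem.List.sorted pr.2 (fun x => x)
    let ti := PySem.List.pyGetD times pr.1 []
    let t := pvSum ti
    let a := PySem.List.pyGetD ti 0 0
    match pvScan t a (PySem.List.pyGetD s 0 0)
        (PySem.List.pyGetD s 1 0 + 1 - PySem.List.pyGetD s 0 0).toNat with
    | some p => min d p
    | none => d) distance

-- ===== PORT B =====
def solution_alt (distance : Int) (scope : List (List Int)) (times : List (List Int)) : Int :=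
  (PySem.List.enumerate scope).foldl (fun d pr =>
    let s := PySem.List.sorted pr.2 (fun x => x)
    let lo := PySem.List.pyGetD s 0 0
    let hi := PySem.List.pyGetD s 1 0
    let ti := PySem.List.pyGetD times pr.1 []
    let t := pvSum ti
    let a := PySem.List.pyGetD ti 0 0
    let r := PySem.Int.mod lo t
    let p := if 1 ≤ r ∧ r ≤ a then lo else lo + PySem.Int.mod (1 - r) t
    if (1 ≤ PySem.Int.mod p t ∧ PySem.Int.mod p t ≤ a) ∧ p ≤ hi then min d p else d) distance

-- ===== PRECONDITION & SPEC =====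
-- Pre_ excludes exactly the inputs on which A raises: a scope row with fewer than 2 entries
-- (IndexError), a missing times row (IndexError), or sum(times[i]) = 0 (ZeroDivisionError).
def Pre_solution (distance : Int) (scope : List (List Int)) (times : List (List Int)) : Prop :=
  ∀ i : Nat, i < scope.length →
    2 ≤ (PySem.List.pyGetD scope (i : Int) []).length ∧
    i < times.length ∧
    pvSum (PySem.List.pyGetD times (i : Int) []) ≠ 0
instance (distance : Int) (scope : List (List Int)) (times : List (List Int)) : Decidable (Pre_solution distance scope times) := by unfold Pre_solution; infer_instance

def pvWitness_solution : Int × List (List Int) × List (List Int) := (10, [[7, 5]], [[2, 3]])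

def Spec_solution (distance : Int) (scope : List (List Int)) (times : List (List Int)) (out : Int) : Prop := out = solution_alt distance scope times
instance (distance : Int) (scope : List (List Int)) (times : List (List Int)) (out : Int) : Decidable (Spec_solution distance scope times out) := by unfold Spec_solution; infer_instance

-- ===== CLAIM (what is proved, stated in full; the proofs are below) =====
def Claim_equal_solution : Prop := ∀ (distance : Int) (scope : List (List Int)) (times : List (List Int)), Dom_solution distance scope times → Pre_solution distance scope times → Spec_solution distance scope times (solution distance scope times)

-- ===== LEMMAS AND PROOFS =====

lemma pv_find?_range_none (lo b : Int) (c : Int → Bool)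
    (h : ∀ q, lo ≤ q → q < b → c q = false) :
    (PySem.List.pyRange lo b).find? c = none := by
  apply List.find?_eq_none.mpr
  intro x hx
  rw [PySem.List.mem_pyRange_one] at hx
  simp [h x hx.1 hx.2]

lemma pv_find?_range_first (lo b p : Int) (c : Int → Bool) (h1 : lo ≤ p) (h2 : p < b)
    (hc : c p = true) (hmin : ∀ q, lo ≤ q → q < p → c q = false) :
    (PySem.List.pyRange lo b).find? c = some p := by
  rw [PySem.List.pyRange_one_append lo p b h1 (le_of_lt h2), List.find?_append,
      pv_find?_range_none lo p c hmin, PySem.List.pyRange_one_cons h2]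
  simp [hc]

-- (lo + x) % t = (lo % t + x) % t
lemma pv_shift_mod (lo x t : Int) : (lo + x) % t = (lo % t + x) % t := by
  conv_lhs => rw [← Int.ediv_add_emod lo t]
  rw [show t * (lo / t) + lo % t + x = lo % t + x + t * (lo / t) from by ring,
      Int.add_mul_emod_self_left]

-- no value strictly before the residue-1 jump point satisfies the patrol condition
lemma pv_no_hit (t r a j : Int) (ht : 2 ≤ t) (hr0 : 0 ≤ r) (hrt : r < t)
    (hcase : ¬(1 ≤ r ∧ r ≤ a)) (hj0 : 0 ≤ j) (hjk : j < (1 - r) % t) :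
    ¬(1 ≤ (r + j) % t ∧ (r + j) % t ≤ a) := by
  by_cases hr : r = 0
  · -- r = 0, jump length is 1 % t = 1
    subst hr
    have h1t : ((1 : Int) - 0) % t = 1 := by
      rw [sub_zero, Int.emod_eq_of_lt (by omega) (by omega)]
    rw [h1t] at hjk
    have hj : j = 0 := by omega
    subst hj
    norm_num
  · have hr1 : 1 ≤ r := by omega
    have ha : a < r := by omega
    by_cases hre : r = 1
    · -- r = 1: jump length 0, no such j
      exfalso
      rw [hre, sub_self, Int.zero_emod] at hjk
      omega
    · -- 2 ≤ r: jump length is 1 - r + t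
      have hr2 : 2 ≤ r := by omega
      have hk : (1 - r) % t = 1 - r + t := by
        have h1 : (1 - r) % t = (1 - r + t) % t := by
          conv_lhs => rw [show (1 - r : Int) = (1 - r + t) + t * (-1) from by ring]
          rw [Int.add_mul_emod_self_left]
        rw [h1, Int.emod_eq_of_lt (by omega) (by omega)]
      rw [hk] at hjk
      by_cases he : r + j = t
      · rw [he, Int.emod_self]; omega
      · rw [Int.emod_eq_of_lt (by omega) (by omega)]; omega

-- the early-exit scan is find? over the corresponding range
lemma pvScan_eq (t a : Int) : ∀ (n : Nat) (lo : Int),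
    pvScan t a lo n = (PySem.List.pyRange lo (lo + n)).find?
      (fun p => decide (1 ≤ PySem.Int.mod p t ∧ PySem.Int.mod p t ≤ a)) := by
  intro n
  induction n with
  | zero =>
    intro lo
    rw [pvScan, show ((0 : Nat) : Int) = 0 from rfl, add_zero,
        PySem.List.pyRange_one_eq_nil le_rfl]
    rfl
  | succ m ih =>
    intro lo
    rw [pvScan, PySem.List.pyRange_one_cons (by push_cast; omega), List.find?_cons]
    by_cases hc : 1 ≤ PySem.Int.mod lo t ∧ PySem.Int.mod lo t ≤ a
    · rw [if_pos hc]
      simp [hc.1, hc.2]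
    · rw [if_neg hc, ih (lo + 1)]
      have h2 : lo + 1 + (m : Int) = lo + ((m : Nat) + 1 : Nat) := by push_cast; omega
      rw [h2]
      simp [hc]

lemma pvScan_eq_find (t a lo hi : Int) :
    pvScan t a lo (hi + 1 - lo).toNat = (PySem.List.pyRange lo (hi + 1)).find?
      (fun p => decide (1 ≤ PySem.Int.mod p t ∧ PySem.Int.mod p t ≤ a)) := by
  by_cases h : lo ≤ hi + 1
  · rw [pvScan_eq]
    congr 2
    omega
  · rw [show (hi + 1 - lo).toNat = 0 from by omega, pvScan,
        PySem.List.pyRange_one_eq_nil (by omega)]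
    rfl

-- the heart of the equivalence: A's inner scan equals B's closed-form candidate, per row
lemma pv_step_eq (lo hi t a : Int) (ht : t ≠ 0) :
    ((PySem.List.pyRange lo (hi + 1)).find?
        (fun q => decide (1 ≤ PySem.Int.mod q t ∧ PySem.Int.mod q t ≤ a)))
    = (if (1 ≤ PySem.Int.mod (if 1 ≤ PySem.Int.mod lo t ∧ PySem.Int.mod lo t ≤ a then lo
              else lo + PySem.Int.mod (1 - PySem.Int.mod lo t) t) t ∧
          PySem.Int.mod (if 1 ≤ PySem.Int.mod lo t ∧ PySem.Int.mod lo t ≤ a then lo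
              else lo + PySem.Int.mod (1 - PySem.Int.mod lo t) t) t ≤ a) ∧
          (if 1 ≤ PySem.Int.mod lo t ∧ PySem.Int.mod lo t ≤ a then lo
              else lo + PySem.Int.mod (1 - PySem.Int.mod lo t) t) ≤ hi
       then some (if 1 ≤ PySem.Int.mod lo t ∧ PySem.Int.mod lo t ≤ a then lo
              else lo + PySem.Int.mod (1 - PySem.Int.mod lo t) t)
       else none) := by
  rcases lt_or_gt_of_ne ht with hneg | hpos
  · -- t < 0: residues are never ≥ 1, both sides are none
    have hm : ∀ q : Int, ¬(1 ≤ PySem.Int.mod q t ∧ PySem.Int.mod q t ≤ a) := by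
      intro q hq
      have := (PySem.Int.mod_neg_bounds q hneg).2
      omega
    rw [if_neg (fun h => hm _ h.1), pv_find?_range_none]
    intro q _ _
    simp only [decide_eq_false_iff_not]
    exact hm q
  · -- 0 < t
    have hmod : ∀ q : Int, PySem.Int.mod q t = q % t :=
      fun q => PySem.Int.mod_eq_emod_of_pos hpos
    simp only [hmod]
    have hr0 : 0 ≤ lo % t := Int.emod_nonneg lo (by omega)
    have hrt : lo % t < t := Int.emod_lt_of_pos lo hpos
    by_cases hcase : 1 ≤ lo % t ∧ lo % t ≤ a
    · -- candidate is lo itself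
      rw [if_pos hcase]
      by_cases hhi : lo ≤ hi
      · rw [if_pos ⟨hcase, hhi⟩]
        exact pv_find?_range_first lo (hi + 1) lo _ le_rfl (by omega)
          (by simp [hcase.1, hcase.2]) (fun q h1 h2 => absurd h1 (by omega))
      · rw [if_neg (fun h => hhi h.2)]
        exact pv_find?_range_none _ _ _ (fun q h1 h2 => absurd h1 (by omega))
    · rw [if_neg hcase]
      by_cases ht1 : t = 1
      · -- t = 1: every residue is 0, both sides none
        subst ht1
        have hz : ∀ q : Int, q % 1 = 0 := fun q => Int.emod_one q
        rw [if_neg (by rw [hz]; omega), pv_find?_range_none]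
        intro q _ _
        simp only [decide_eq_false_iff_not, hz]
        omega
      · -- 2 ≤ t: the candidate is the next point of residue 1
        have ht2 : 2 ≤ t := by omega
        have hpm : (lo + (1 - lo % t) % t) % t = 1 := by
          rw [pv_shift_mod, Int.add_emod_emod,
              show lo % t + (1 - lo % t) = 1 from by ring,
              Int.emod_eq_of_lt (by omega) (by omega)]
        have hmin : ∀ q, lo ≤ q → q < lo + (1 - lo % t) % t →
            (fun q => decide (1 ≤ q % t ∧ q % t ≤ a)) q = false := by
          intro q h1 h2
          simp only [decide_eq_false_iff_not]
          have hq : q % t = (lo % t + (q - lo)) % t := by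
            conv_lhs => rw [show q = lo + (q - lo) from by ring]
            rw [pv_shift_mod]
          rw [hq]
          exact pv_no_hit t (lo % t) a (q - lo) ht2 hr0 hrt hcase (by omega) (by omega)
        by_cases ha : 1 ≤ a
        · by_cases hph : lo + (1 - lo % t) % t ≤ hi
          · rw [if_pos ⟨⟨by omega, by omega⟩, hph⟩]
            refine pv_find?_range_first lo (hi + 1) _ _ ?_ (by omega)
              (by simp only [hpm, decide_eq_true_eq]; omega) hmin
            have : 0 ≤ (1 - lo % t) % t := Int.emod_nonneg _ (by omega)
            omega
          · rw [if_neg (fun h => hph h.2)]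
            exact pv_find?_range_none _ _ _ (fun q h1 h2 => hmin q h1 (by omega))
        · -- a < 1: condition can never hold
          rw [if_neg (by rw [hpm]; omega), pv_find?_range_none]
          intro q _ _
          simp only [decide_eq_false_iff_not]
          omega
    
-- fold the per-row equality through the enumerate loop
lemma pv_fold_eq (times : List (List Int)) (scope : List (List Int)) :
    ∀ (s d : Int),
    (∀ pr ∈ PySem.List.enumerate scope s, pvSum (PySem.List.pyGetD times pr.1 []) ≠ 0) →
    ((PySem.List.enumerate scope s).foldl (fun d pr =>
      let s := PySem.List.sorted pr.2 (fun x => x)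
      let ti := PySem.List.pyGetD times pr.1 []
      let t := pvSum ti
      let a := PySem.List.pyGetD ti 0 0
      match pvScan t a (PySem.List.pyGetD s 0 0)
          (PySem.List.pyGetD s 1 0 + 1 - PySem.List.pyGetD s 0 0).toNat with
      | some p => min d p
      | none => d) d)
    = ((PySem.List.enumerate scope s).foldl (fun d pr =>
      let s := PySem.List.sorted pr.2 (fun x => x)
      let lo := PySem.List.pyGetD s 0 0
      let hi := PySem.List.pyGetD s 1 0
      let ti := PySem.List.pyGetD times pr.1 []
      let t := pvSum ti
      let a := PySem.List.pyGetD ti 0 0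
      let r := PySem.Int.mod lo t
      let p := if 1 ≤ r ∧ r ≤ a then lo else lo + PySem.Int.mod (1 - r) t
      if (1 ≤ PySem.Int.mod p t ∧ PySem.Int.mod p t ≤ a) ∧ p ≤ hi then min d p else d) d) := by
  induction scope with
  | nil => intro s d h; rfl
  | cons x xs ih =>
    intro s d h
    rw [PySem.List.enumerate_cons, List.foldl_cons, List.foldl_cons]
    have hhead : pvSum (PySem.List.pyGetD times s []) ≠ 0 := by
      have := h (s, x) (by rw [PySem.List.enumerate_cons]; exact List.mem_cons_self ..)
      exact this
    have hstep := pv_step_eq (PySem.List.pyGetD (PySem.List.sorted x (fun x => x)) 0 0)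
      (PySem.List.pyGetD (PySem.List.sorted x (fun x => x)) 1 0)
      (pvSum (PySem.List.pyGetD times s []))
      (PySem.List.pyGetD (PySem.List.pyGetD times s []) 0 0) hhead
    have htail : ∀ pr ∈ PySem.List.enumerate xs (s + 1),
        pvSum (PySem.List.pyGetD times pr.1 []) ≠ 0 := by
      intro pr hpr
      exact h pr (by rw [PySem.List.enumerate_cons]; exact List.mem_cons_of_mem _ hpr)
    rw [ih (s + 1) _ htail]
    congr 1
    simp only []
    rw [pvScan_eq_find, hstep]
    split_ifs <;> rfl

-- ===== VERDICT (by name: the statement is the Claim_ definition above) =====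
theorem solution_spec : Claim_equal_solution := by
  intro distance scope times hdom hpre
  unfold Spec_solution solution solution_alt
  apply pv_fold_eq
  intro pr hpr
  rw [PySem.List.enumerate_eq_map_pyRange scope ([] : List Int)] at hpr
  rcases List.mem_map.mp hpr with ⟨j, hj, rfl⟩
  rw [PySem.List.mem_pyRange_one, PySem.List.len_eq] at hj
  have h := (hpre j.toNat (by omega)).2.2
  simpa [Int.toNat_of_nonneg hj.1] using h
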